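-- pv_equiv track=rewrite | github.com/oussamaoutar/Scheduling-Project | src/apps/metrics/services/metrics_service.py | compute_tardiness_summary
-- ===== SOURCE A (Python) =====
-- def compute_tardiness_summary(job_completion_details):
--     tardiness_values = [
--         item["tardiness_minutes"] for item in job_completion_details
--     ]
--
--     total_tardiness = sum(tardiness_values)
--     average_tardiness = (
--         int(total_tardiness / len(tardiness_values))
--         if tardiness_values
--         else 0
--     )
--     max_tardiness = max(tardiness_values) if tardiness_values else 0
--     late_jobs_count = sum(1 for value in tardiness_values if value > 0)
--
--     return {
--         "total_tardiness_minutes": total_tardiness,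
--         "average_tardiness_minutes": average_tardiness,
--         "max_tardiness_minutes": max_tardiness,
--         "late_jobs_count": late_jobs_count,
--     }
-- ===== SOURCE B (Python) =====
-- def compute_tardiness_summary(job_completion_details):
--     total = 0
--     max_tardiness = None
--     late_jobs_count = 0
--     count = 0
--     for item in job_completion_details:
--         v = item["tardiness_minutes"]
--         total += v
--         max_tardiness = v if max_tardiness is None else max(max_tardiness, v)
--         if v > 0:
--             late_jobs_count += 1
--         count += 1
--     return {
--         "total_tardiness_minutes": total,
--         "average_tardiness_minutes": int(total / count) if count else 0,
--         "max_tardiness_minutes": max_tardiness if max_tardiness is not None else 0,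
--         "late_jobs_count": late_jobs_count,
--     }
-- ===== Notes on version B (the rewrite author's own statement) =====
-- stated objective: alternative
-- what changed: Replaces the intermediate list and four separate passes (sum, len+division, max, late-count) with one explicit loop maintaining a running total, an Option-style running max, a late counter and an item count.
import Mathlib
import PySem

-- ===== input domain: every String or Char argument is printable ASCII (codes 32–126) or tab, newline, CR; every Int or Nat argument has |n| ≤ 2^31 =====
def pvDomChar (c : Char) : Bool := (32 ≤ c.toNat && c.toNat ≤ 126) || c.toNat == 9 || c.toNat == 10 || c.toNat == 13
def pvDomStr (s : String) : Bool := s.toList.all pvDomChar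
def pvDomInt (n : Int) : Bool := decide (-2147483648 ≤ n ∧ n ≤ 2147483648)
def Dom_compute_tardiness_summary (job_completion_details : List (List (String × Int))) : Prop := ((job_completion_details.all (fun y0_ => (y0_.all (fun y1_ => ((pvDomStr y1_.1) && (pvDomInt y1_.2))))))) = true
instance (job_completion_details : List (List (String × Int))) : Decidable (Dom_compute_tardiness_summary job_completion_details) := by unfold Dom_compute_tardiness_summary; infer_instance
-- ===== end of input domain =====

-- B replaces A's intermediate list and four separate passes with one explicit loop
-- over the items maintaining (total, running max as Option, late count, item count).


-- ===== PORT A =====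
-- item["tardiness_minutes"]: first-match assoc lookup; KeyError (missing key) is excluded by Pre_.
-- int(total / len): Python's float division then truncation toward zero, ported as Int.tdiv;
-- exact whenever |total_tardiness| ≤ 2^52.
def compute_tardiness_summary (job_completion_details : List (List (String × Int))) : List (String × Int) :=
  let tardiness_values := job_completion_details.map
    (fun item => (List.lookup "tardiness_minutes" item).getD 0)
  let total_tardiness := tardiness_values.sum
  let average_tardiness :=
    if tardiness_values ≠ [] then Int.tdiv total_tardiness tardiness_values.length else 0
  let max_tardiness :=
    match PySem.List.max? tardiness_values (fun x => x) with
    | some m => m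
    | none => 0
  let late_jobs_count :=
    ((tardiness_values.filter (fun v => decide (0 < v))).map (fun _ => (1 : Int))).sum
  [("total_tardiness_minutes", total_tardiness),
   ("average_tardiness_minutes", average_tardiness),
   ("max_tardiness_minutes", max_tardiness),
   ("late_jobs_count", late_jobs_count)]

-- ===== PORT B =====
-- one fold with state (total, running max : Option Int, late count, item count)
def compute_tardiness_summary_alt (job_completion_details : List (List (String × Int))) : List (String × Int) :=
  let st := job_completion_details.foldl
    (fun (st : Int × Option Int × Int × Int) item =>
      let v := (List.lookup "tardiness_minutes" item).getD 0
      (st.1 + v,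
       some (match st.2.1 with | none => v | some m => max m v),
       st.2.2.1 + (if 0 < v then (1 : Int) else 0),
       st.2.2.2 + 1))
    (0, none, 0, 0)
  [("total_tardiness_minutes", st.1),
   ("average_tardiness_minutes", if st.2.2.2 ≠ 0 then Int.tdiv st.1 st.2.2.2 else 0),
   ("max_tardiness_minutes", (st.2.1).getD 0),
   ("late_jobs_count", st.2.2.1)]

-- ===== PRECONDITION & SPEC =====
-- Pre_ excludes exactly the inputs on which A raises KeyError: some item without the key "tardiness_minutes".
def Pre_compute_tardiness_summary (job_completion_details : List (List (String × Int))) : Prop :=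
  (job_completion_details.all (fun item => item.any (fun p => p.1 == "tardiness_minutes"))) = true
instance (job_completion_details : List (List (String × Int))) : Decidable (Pre_compute_tardiness_summary job_completion_details) := by unfold Pre_compute_tardiness_summary; infer_instance
def pvWitness_compute_tardiness_summary : (List (List (String × Int))) :=
  [[("tardiness_minutes", 5)], [("tardiness_minutes", -3)]]
def Spec_compute_tardiness_summary (job_completion_details : List (List (String × Int))) (out : List (String × Int)) : Prop := out = compute_tardiness_summary_alt job_completion_details
instance (job_completion_details : List (List (String × Int))) (out : List (String × Int)) : Decidable (Spec_compute_tardiness_summary job_completion_details out) := by unfold Spec_compute_tardiness_summary; infer_instance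

-- ===== CLAIM (what is proved, stated in full; the proofs are below) =====
def Claim_equal_compute_tardiness_summary : Prop := ∀ (job_completion_details : List (List (String × Int))), Dom_compute_tardiness_summary job_completion_details → Pre_compute_tardiness_summary job_completion_details → Spec_compute_tardiness_summary job_completion_details (compute_tardiness_summary job_completion_details)

-- ===== LEMMAS AND PROOFS =====

def pvF (item : List (String × Int)) : Int := (List.lookup "tardiness_minutes" item).getD 0

def pvStep (st : Int × Option Int × Int × Int) (item : List (String × Int)) :
    Int × Option Int × Int × Int :=
  let v := pvF item
  (st.1 + v,
   some (match st.2.1 with | none => v | some m => max m v),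
   st.2.2.1 + (if 0 < v then (1 : Int) else 0),
   st.2.2.2 + 1)

theorem pvFold_some (xs : List (List (String × Int))) :
    ∀ t m l c, xs.foldl pvStep (t, some m, l, c) =
      (t + (xs.map pvF).sum,
       some ((xs.map pvF).foldl max m),
       l + ((xs.map pvF).filter (fun v => decide (0 < v))).length,
       c + xs.length) := by
  induction xs with
  | nil => simp
  | cons x xs ih =>
      intro t m l c
      simp only [List.foldl_cons, pvStep, List.map_cons, List.sum_cons, List.filter_cons,
        List.foldl_cons, List.length_cons, ih]
      by_cases h : (0 : Int) < pvF x <;> simp [h] <;> and_intros <;> omega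

theorem pvFold_none (xs : List (List (String × Int))) :
    xs.foldl pvStep (0, none, 0, 0) =
      match xs with
      | [] => (0, none, 0, 0)
      | x :: xs' =>
        (pvF x + (xs'.map pvF).sum,
         some ((xs'.map pvF).foldl max (pvF x)),
         (if 0 < pvF x then (1 : Int) else 0)
           + ((xs'.map pvF).filter (fun v => decide (0 < v))).length,
         (xs'.length : Int) + 1) := by
  cases xs with
  | nil => rfl
  | cons x xs' =>
      simp only [List.foldl_cons]
      show xs'.foldl pvStep (0 + pvF x, some (pvF x), _, _) = _
      rw [pvFold_some]
      by_cases h : (0 : Int) < pvF x <;> simp [h] <;> omega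

-- ===== VERDICT (by name: the statement is the Claim_ definition above) =====
theorem compute_tardiness_summary_spec : Claim_equal_compute_tardiness_summary := by
  intro xs _ _
  show compute_tardiness_summary xs = compute_tardiness_summary_alt xs
  unfold compute_tardiness_summary compute_tardiness_summary_alt
  rw [show (fun item => (List.lookup "tardiness_minutes" item).getD 0) = pvF from rfl]
  rw [show (fun (st : Int × Option Int × Int × Int) item =>
        ((st.1 + (List.lookup "tardiness_minutes" item).getD 0,
          some (match st.2.1 with | none => (List.lookup "tardiness_minutes" item).getD 0
                                  | some m => max m ((List.lookup "tardiness_minutes" item).getD 0)),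
          st.2.2.1 + (if 0 < (List.lookup "tardiness_minutes" item).getD 0 then (1 : Int) else 0),
          st.2.2.2 + 1) : Int × Option Int × Int × Int)) = pvStep from rfl]
  rw [pvFold_none]
  cases xs with
  | nil => rfl
  | cons x xs' =>
      simp only [List.map_cons, List.sum_cons, List.filter_cons, List.length_cons,
        PySem.List.max?_id_cons]
      by_cases h : (0 : Int) < pvF x <;> simp [h] <;> omega
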